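-- pv_equiv track=rewrite | github.com/ClementPinard/adventofcode | 2023/24/24_sol.py | lifting_candidates
-- ===== SOURCE A (Python) =====
-- def lifting_candidates(solution):
--     modulus = solution[6]
--     non_scaled_expansion = [
--         [a, b, c, d, e, f, 1]
--         for a in range(2)
--         for b in range(2)
--         for c in range(2)
--         for d in range(2)
--         for e in range(2)
--         for f in range(2)
--     ]
--     candidates = [
--         [x + modulus * y for x, y in zip(solution, option)]
--         for option in non_scaled_expansion
--     ]
--     return candidates
-- ===== SOURCE B (Python) =====
-- def lifting_candidates(solution):
--     # Recursive doubling: build the candidate tails from position 6 backwards,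
--     # prepending the unshifted and the modulus-shifted coordinate at each level.
--     modulus = solution[6]
--
--     def tails(k):
--         if k == 6:
--             return [[solution[6] + modulus]]
--         rest = tails(k + 1)
--         return [[solution[k]] + t for t in rest] + \
--                [[solution[k] + modulus] + t for t in rest]
--
--     return tails(0)
-- ===== Notes on version B (the rewrite author's own statement) =====
-- stated objective: alternative
-- what changed: Replaces the flat enumeration of all 64 bit-vectors followed by a zip/scale pass with a recursive doubling construction that builds candidate tails from position 6 backwards, at each level prepending the unshifted and the modulus-shifted coordinate to every shorter tail.
import Mathlib
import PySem

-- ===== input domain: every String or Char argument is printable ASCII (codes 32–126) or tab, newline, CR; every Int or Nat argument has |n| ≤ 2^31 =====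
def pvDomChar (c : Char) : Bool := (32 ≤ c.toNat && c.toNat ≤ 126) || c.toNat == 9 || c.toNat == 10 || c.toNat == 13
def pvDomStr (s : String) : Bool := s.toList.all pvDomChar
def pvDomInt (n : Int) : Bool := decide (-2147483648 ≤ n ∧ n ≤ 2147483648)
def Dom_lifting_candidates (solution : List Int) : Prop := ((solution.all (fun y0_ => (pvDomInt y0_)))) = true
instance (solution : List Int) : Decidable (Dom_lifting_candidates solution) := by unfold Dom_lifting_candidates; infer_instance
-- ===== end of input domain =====

-- ===== PORT A =====
-- B builds the rows by recursive doubling over positions 6..0 instead of enumerating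
-- the 64 bit vectors and rescaling them with a zip pass; equal return values are proved
-- for lists of length >= 7 (Pre_ excludes shorter lists, where Python A raises IndexError).
def lifting_candidates (solution : List Int) : List (List Int) :=
  match PySem.List.pyGet? solution 6 with
  | none => []  -- Python raises IndexError here; excluded by Pre_
  | some modulus =>
    let non_scaled_expansion : List (List Int) :=
      ([0, 1] : List Int).flatMap fun a =>
      ([0, 1] : List Int).flatMap fun b =>
      ([0, 1] : List Int).flatMap fun c =>
      ([0, 1] : List Int).flatMap fun d =>
      ([0, 1] : List Int).flatMap fun e =>
      ([0, 1] : List Int).map fun f => [a, b, c, d, e, f, 1]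
    non_scaled_expansion.map fun option =>
      (solution.zip option).map fun xy => xy.1 + modulus * xy.2

-- ===== PORT B =====
-- tails(k) from Source B; the recursion parameter is fuel = 6 - k (structural), so k = 6 - fuel.
def pvTails (solution : List Int) (modulus : Int) : Nat → List (List Int)
  | 0 => [[(PySem.List.pyGet? solution 6).getD 0 + modulus]]
  | n + 1 =>
    let k : Int := 6 - (n + 1)
    let rest := pvTails solution modulus n
    (rest.map fun t => (PySem.List.pyGet? solution k).getD 0 :: t)
      ++ rest.map fun t => ((PySem.List.pyGet? solution k).getD 0 + modulus) :: t

def lifting_candidates_alt (solution : List Int) : List (List Int) :=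
  match PySem.List.pyGet? solution 6 with
  | none => []  -- Python raises IndexError here; excluded by Pre_
  | some modulus => pvTails solution modulus 6

-- ===== PRECONDITION & SPEC =====
-- Python A raises IndexError on solution[6] when the list has fewer than 7 elements.
def Pre_lifting_candidates (solution : List Int) : Prop := 7 ≤ solution.length
instance (solution : List Int) : Decidable (Pre_lifting_candidates solution) := by unfold Pre_lifting_candidates; infer_instance
def pvWitness_lifting_candidates : List Int := [1, 2, 3, 4, 5, 6, 7]
def Spec_lifting_candidates (solution : List Int) (out : List (List Int)) : Prop := out = lifting_candidates_alt solution
instance (solution : List Int) (out : List (List Int)) : Decidable (Spec_lifting_candidates solution out) := by unfold Spec_lifting_candidates; infer_instance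

-- ===== CLAIM (what is proved, stated in full; the proofs are below) =====
def Claim_equal_lifting_candidates : Prop := ∀ (solution : List Int), Dom_lifting_candidates solution → Pre_lifting_candidates solution → Spec_lifting_candidates solution (lifting_candidates solution)

-- ===== LEMMAS AND PROOFS =====
-- Both results depend only on the first seven elements (zip truncates in A; B reads
-- indices 0..6), so after splitting off seven heads both sides evaluate to 64 explicit rows.
set_option maxHeartbeats 4000000 in
theorem lifting_candidates_eq (a b c d e f g : Int) (rest : List Int) :
    lifting_candidates (a :: b :: c :: d :: e :: f :: g :: rest)
      = lifting_candidates_alt (a :: b :: c :: d :: e :: f :: g :: rest) := by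
  have p0 : PySem.List.pyGet? (a :: b :: c :: d :: e :: f :: g :: rest) 0 = some a := by
    simp only [PySem.List.pyGet?, PySem.List.pyIdx?, List.length_cons]
    rw [if_pos (by omega), if_pos (by push_cast; omega)]; rfl
  have p1 : PySem.List.pyGet? (a :: b :: c :: d :: e :: f :: g :: rest) 1 = some b := by
    simp only [PySem.List.pyGet?, PySem.List.pyIdx?, List.length_cons]
    rw [if_pos (by omega), if_pos (by push_cast; omega)]; rfl
  have p2 : PySem.List.pyGet? (a :: b :: c :: d :: e :: f :: g :: rest) 2 = some c := by
    simp only [PySem.List.pyGet?, PySem.List.pyIdx?, List.length_cons]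
    rw [if_pos (by omega), if_pos (by push_cast; omega)]; rfl
  have p3 : PySem.List.pyGet? (a :: b :: c :: d :: e :: f :: g :: rest) 3 = some d := by
    simp only [PySem.List.pyGet?, PySem.List.pyIdx?, List.length_cons]
    rw [if_pos (by omega), if_pos (by push_cast; omega)]; rfl
  have p4 : PySem.List.pyGet? (a :: b :: c :: d :: e :: f :: g :: rest) 4 = some e := by
    simp only [PySem.List.pyGet?, PySem.List.pyIdx?, List.length_cons]
    rw [if_pos (by omega), if_pos (by push_cast; omega)]; rfl
  have p5 : PySem.List.pyGet? (a :: b :: c :: d :: e :: f :: g :: rest) 5 = some f := by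
    simp only [PySem.List.pyGet?, PySem.List.pyIdx?, List.length_cons]
    rw [if_pos (by omega), if_pos (by push_cast; omega)]; rfl
  have p6 : PySem.List.pyGet? (a :: b :: c :: d :: e :: f :: g :: rest) 6 = some g := by
    simp only [PySem.List.pyGet?, PySem.List.pyIdx?, List.length_cons]
    rw [if_pos (by omega), if_pos (by push_cast; omega)]; rfl
  simp only [lifting_candidates, lifting_candidates_alt, p6]
  norm_num only [pvTails]
  simp only [p0, p1, p2, p3, p4, p5, p6,
    List.flatMap, List.map, List.flatten, List.append, List.zip, List.zipWith, Option.getD]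
  norm_num

-- ===== VERDICT (by name: the statement is the Claim_ definition above) =====
theorem lifting_candidates_spec : Claim_equal_lifting_candidates := by
  intro solution _ hpre
  unfold Pre_lifting_candidates at hpre
  unfold Spec_lifting_candidates
  match solution, hpre with
  | a :: b :: c :: d :: e :: f :: g :: rest, _ =>
    exact lifting_candidates_eq a b c d e f g rest
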